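-- pv_equiv track=rewrite | github.com/WangShuo0317/UGUiNER | Eval.py | find_entity_spans
-- ===== SOURCE A (Python) =====
-- def find_entity_spans(labels):
--     """
--     Given a list of labels, returns a list of entity spans (start, end).
--
--     :param labels: List[int] - sequence of labels (1 for inside an entity, 0 otherwise)
--     :return: List[Tuple[int, int]] - list of entity spans (start, end)
--     """
--     entities = []
--     start = None
--     for i, label in enumerate(labels + [0]):  # Add extra 0 to handle the last entity
--         if label == 1:
--             if start is None:
--                 start = i
--         elif start is not None:
--             entities.append((start, i))
--             start = None
--     return entities
-- ===== SOURCE B (Python) =====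
-- from itertools import groupby
--
--
-- def find_entity_spans(labels):
--     spans = []
--     offset = 0
--     for key, group in groupby(labels):
--         length = sum(1 for _ in group)
--         if key == 1:
--             spans.append((offset, offset + length))
--         offset += length
--     return spans
-- ===== Notes on version B (the rewrite author's own statement) =====
-- stated objective: idiomatic
-- what changed: Replaced the None-start state machine over the sentinel-extended label list with itertools.groupby run-length grouping and a running offset, removing the appended-zero sentinel and the per-element state.
import Mathlib
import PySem

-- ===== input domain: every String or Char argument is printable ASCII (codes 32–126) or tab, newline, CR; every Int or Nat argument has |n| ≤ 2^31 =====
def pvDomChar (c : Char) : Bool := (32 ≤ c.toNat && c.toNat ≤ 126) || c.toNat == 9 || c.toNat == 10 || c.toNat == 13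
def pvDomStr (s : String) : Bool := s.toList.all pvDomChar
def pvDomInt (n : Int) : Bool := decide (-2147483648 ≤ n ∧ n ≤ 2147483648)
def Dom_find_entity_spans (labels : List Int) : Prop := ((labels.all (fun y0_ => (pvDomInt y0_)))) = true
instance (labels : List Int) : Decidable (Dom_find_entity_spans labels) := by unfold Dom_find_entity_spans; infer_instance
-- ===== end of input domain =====

-- B replaces A's None-start state machine over labels+[0] with run-length grouping (groupby) and a running offset; objective: more idiomatic, same cost.


-- ===== PORT A =====
-- the for-loop over enumerate(labels + [0]) with state (entities, start), as structural recursion carrying the index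
def pvALoop (ents : List (Int × Int)) (start : Option Int) (i : Int) : List Int → List (Int × Int)
  | [] => ents
  | l :: ls =>
    if l == 1 then
      match start with
      | none => pvALoop ents (some i) (i + 1) ls
      | some s => pvALoop ents (some s) (i + 1) ls
    else
      match start with
      | some s => pvALoop (ents ++ [(s, i)]) none (i + 1) ls
      | none => pvALoop ents none (i + 1) ls

def find_entity_spans (labels : List Int) : List (Int × Int) :=
  pvALoop [] none 0 (labels ++ [0])

-- ===== PORT B =====
-- groupby: each group is the head plus the equal prefix of the tail; emit a span when the key is 1, advance the offset by the run length
def pvBGo (labels : List Int) (off : Int) : List (Int × Int) :=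
  match labels with
  | [] => []
  | x :: xs =>
    let run := xs.takeWhile (· == x)
    let rest := xs.dropWhile (· == x)
    let len : Int := (run.length : Int) + 1
    (if x == 1 then [(off, off + len)] else []) ++ pvBGo rest (off + len)
termination_by labels.length
decreasing_by
  have := List.length_dropWhile_le (· == x) xs
  simp only [List.length_cons]
  omega

def find_entity_spans_alt (labels : List Int) : List (Int × Int) :=
  pvBGo labels 0

-- ===== PRECONDITION & SPEC =====
def Spec_find_entity_spans (labels : List Int) (out : List (Int × Int)) : Prop := out = find_entity_spans_alt labels
instance (labels : List Int) (out : List (Int × Int)) : Decidable (Spec_find_entity_spans labels out) := by unfold Spec_find_entity_spans; infer_instance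

-- ===== CLAIM (what is proved, stated in full; the proofs are below) =====
def Claim_equal_find_entity_spans : Prop := ∀ (labels : List Int), Dom_find_entity_spans labels → Spec_find_entity_spans labels (find_entity_spans labels)

-- ===== LEMMAS AND PROOFS =====

-- step lemmas unfolding one iteration of A's loop
theorem pvALoop_one_none (ents : List (Int × Int)) (i : Int) (ls : List Int) :
    pvALoop ents none i (1 :: ls) = pvALoop ents (some i) (i + 1) ls := by
  simp [pvALoop]

theorem pvALoop_one_some (ents : List (Int × Int)) (i s : Int) (ls : List Int) :
    pvALoop ents (some s) i (1 :: ls) = pvALoop ents (some s) (i + 1) ls := by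
  simp [pvALoop]

theorem pvALoop_ne_none (ents : List (Int × Int)) (i l : Int) (h : (l == 1) = false) (ls : List Int) :
    pvALoop ents none i (l :: ls) = pvALoop ents none (i + 1) ls := by
  simp [pvALoop, h]

theorem pvALoop_ne_some (ents : List (Int × Int)) (i s l : Int) (h : (l == 1) = false) (ls : List Int) :
    pvALoop ents (some s) i (l :: ls) = pvALoop (ents ++ [(s, i)]) none (i + 1) ls := by
  simp [pvALoop, h]

-- skipping one non-1 label: the grouping either merges it into the next group or closes a group that emits nothing
theorem pvBGo_skip (x : Int) (hx : (x == 1) = false) (xs : List Int) (i : Int) :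
    pvBGo (x :: xs) i = pvBGo xs (i + 1) := by
  cases xs with
  | nil => simp [pvBGo, hx]
  | cons y ys =>
    by_cases hy : (y == x) = true
    · have hyx : y = x := by simpa using hy
      subst hyx
      rw [pvBGo, pvBGo]
      simp only [hx, List.takeWhile_cons, List.dropWhile_cons, hy, if_true, List.length_cons]
      norm_num
      congr 1
      ring
    · rw [pvBGo]
      simp [hx, hy]

-- the joint invariant of A's loop vs B's grouping, for both values of A's `start` state
theorem pvLoop_inv (ls : List Int) :
    (∀ (i : Int) (ents : List (Int × Int)),
        pvALoop ents none i (ls ++ [0]) = ents ++ pvBGo ls i) ∧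
    (∀ (i s : Int) (ents : List (Int × Int)),
        pvALoop ents (some s) i (ls ++ [0]) =
          ents ++ (s, i + ((ls.takeWhile (· == (1:Int))).length : Int)) ::
            pvBGo (ls.dropWhile (· == (1:Int))) (i + ((ls.takeWhile (· == (1:Int))).length : Int))) := by
  induction ls with
  | nil =>
    constructor
    · intro i ents; simp [pvALoop, pvBGo]
    · intro i s ents; simp [pvALoop, pvBGo]
  | cons x xs ih =>
    obtain ⟨ihn, ihs⟩ := ih
    constructor
    · intro i ents
      by_cases hx : (x == 1) = true
      · have hx1 : x = 1 := by simpa using hx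
        subst hx1
        rw [List.cons_append, pvALoop_one_none, ihs (i + 1) i ents, pvBGo]
        norm_num
        exact ⟨by ring, by congr 1; ring⟩
      · have hx' : (x == 1) = false := by simpa using hx
        rw [List.cons_append, pvALoop_ne_none ents i x hx', ihn (i + 1) ents,
            pvBGo_skip x hx' xs i]
    · intro i s ents
      by_cases hx : (x == 1) = true
      · have hx1 : x = 1 := by simpa using hx
        subst hx1
        rw [List.cons_append, pvALoop_one_some, ihs (i + 1) s ents]
        simp only [List.takeWhile_cons, List.dropWhile_cons]
        norm_num
        exact ⟨by ring, by congr 1; ring⟩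
      · have hx' : (x == 1) = false := by simpa using hx
        rw [List.cons_append, pvALoop_ne_some ents i s x hx', ihn (i + 1) (ents ++ [(s, i)])]
        simp only [List.takeWhile_cons, List.dropWhile_cons, hx', Bool.false_eq_true, if_false,
          List.length_nil, Nat.cast_zero, add_zero]
        rw [pvBGo_skip x hx' xs i]
        simp

-- ===== VERDICT (by name: the statement is the Claim_ definition above) =====
theorem find_entity_spans_spec : Claim_equal_find_entity_spans := by
  intro labels _
  unfold Spec_find_entity_spans find_entity_spans find_entity_spans_alt
  simpa using (pvLoop_inv labels).1 0 []
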